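-- pv_equiv track=rewrite | github.com/kyle0527/mermaid-dist | run_v3_then_combine.py | md_non_mermaid_as_comments
-- ===== SOURCE A (Python) =====
-- def md_non_mermaid_as_comments(md_text: str) -> str:
--     out_lines = []
--     in_code = False
--     for line in md_text.splitlines():
--         stripped = line.strip()
--         if stripped.startswith("```"):
--             in_code = not in_code
--             continue
--         if in_code:
--             continue
--         out_lines.append("%%" if stripped == "" else ("%% " + line))
--     return "\n".join(out_lines) + "\n"
-- ===== SOURCE B (Python) =====
-- def md_non_mermaid_as_comments(md_text: str) -> str:
--     # Pass 1: partition the lines into segments split at each fence line,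
--     # so segments alternate non-code / code, starting with non-code.
--     segments = [[]]
--     for line in md_text.splitlines():
--         if line.strip().startswith("```"):
--             segments.append([])
--         else:
--             segments[-1].append(line)
--     # Pass 2: emit only the even-indexed (non-code) segments, commented.
--     out = ["%%" if line.strip() == "" else "%% " + line
--            for seg in segments[::2] for line in seg]
--     return "\n".join(out) + "\n"
-- ===== Notes on version B (the rewrite author's own statement) =====
-- stated objective: alternative
-- what changed: Replaces the single stateful toggle loop by a two-phase decomposition: first partition the lines into fence-delimited segments, then emit commented lines from the even-indexed (non-code) segments only.
import Mathlib
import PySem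

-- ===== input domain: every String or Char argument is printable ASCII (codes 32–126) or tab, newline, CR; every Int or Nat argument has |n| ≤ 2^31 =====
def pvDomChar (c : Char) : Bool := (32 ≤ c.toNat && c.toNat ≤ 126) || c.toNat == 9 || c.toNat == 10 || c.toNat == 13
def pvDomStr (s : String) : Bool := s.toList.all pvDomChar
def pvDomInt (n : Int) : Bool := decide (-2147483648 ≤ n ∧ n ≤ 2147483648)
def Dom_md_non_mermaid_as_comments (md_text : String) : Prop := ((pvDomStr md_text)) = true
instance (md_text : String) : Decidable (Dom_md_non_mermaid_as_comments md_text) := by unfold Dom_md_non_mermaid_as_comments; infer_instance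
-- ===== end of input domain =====

-- B replaces A's stateful toggle loop by a two-phase decomposition (partition into
-- fence-delimited segments, then emit the even-indexed segments); objective: alternative.

-- ===== PORT A =====
-- one loop iteration of A: state = (out_lines, in_code)
def pvAStep (st : List String × Bool) (line : String) : List String × Bool :=
  let stripped := PySem.Str.strip line
  if PySem.Str.startswith stripped "```" then (st.1, !st.2)
  else if st.2 then st
  else (st.1 ++ [if stripped == "" then "%%" else "%% " ++ line], st.2)

def md_non_mermaid_as_comments (md_text : String) : String :=
  let st := (PySem.Str.splitlines md_text).foldl pvAStep ([], false)
  PySem.Str.join "\n" st.1 ++ "\n"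

-- ===== PORT B =====
-- segments[-1].append(line)
def pvAppendLast (segs : List (List String)) (line : String) : List (List String) :=
  match segs with
  | [] => []
  | [s] => [s ++ [line]]
  | s :: rest => s :: pvAppendLast rest line

-- one iteration of B's first pass
def pvBStep (segs : List (List String)) (line : String) : List (List String) :=
  if PySem.Str.startswith (PySem.Str.strip line) "```" then segs ++ [[]]
  else pvAppendLast segs line

-- hand port of segments[::2] (exact: every other element starting at index 0)
def pvEvens {α : Type} : List α → List α
  | [] => []
  | [x] => [x]
  | x :: _ :: rest => x :: pvEvens rest

def pvComment (line : String) : String :=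
  if PySem.Str.strip line == "" then "%%" else "%% " ++ line

-- B's second pass: the flattened comprehension over segments[::2]
def pvC (segs : List (List String)) : List String :=
  (pvEvens segs).flatMap (fun seg => seg.map pvComment)

def md_non_mermaid_as_comments_alt (md_text : String) : String :=
  let segs := (PySem.Str.splitlines md_text).foldl pvBStep [[]]
  PySem.Str.join "\n" (pvC segs) ++ "\n"

-- ===== PRECONDITION & SPEC =====
def Spec_md_non_mermaid_as_comments (md_text : String) (out : String) : Prop := out = md_non_mermaid_as_comments_alt md_text
instance (md_text : String) (out : String) : Decidable (Spec_md_non_mermaid_as_comments md_text out) := by unfold Spec_md_non_mermaid_as_comments; infer_instance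

-- ===== CLAIM (what is proved, stated in full; the proofs are below) =====
def Claim_equal_md_non_mermaid_as_comments : Prop := ∀ (md_text : String), Dom_md_non_mermaid_as_comments md_text → Spec_md_non_mermaid_as_comments md_text (md_non_mermaid_as_comments md_text)

-- ===== LEMMAS AND PROOFS =====

theorem pvAppendLast_length (segs : List (List String)) (l : String) :
    (pvAppendLast segs l).length = segs.length := by
  induction segs using pvAppendLast.induct <;> simp_all [pvAppendLast]

theorem pvAppendLast_ne_nil (segs : List (List String)) (l : String) (h : segs ≠ []) :
    pvAppendLast segs l ≠ [] := by
  intro h2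
  have := pvAppendLast_length segs l
  rw [h2] at this
  exact h (List.length_eq_zero_iff.mp this.symm)

theorem pvC_cons_cons (a b : List String) (X : List (List String)) :
    pvC (a :: b :: X) = a.map pvComment ++ pvC X := by
  simp [pvC, pvEvens]

theorem pvC_append_nil (segs : List (List String)) :
    pvC (segs ++ [[]]) = pvC segs := by
  induction segs using pvEvens.induct <;> simp_all [pvC, pvEvens]

theorem pvC_appendLast : ∀ (segs : List (List String)) (l : String), segs ≠ [] →
    pvC (pvAppendLast segs l)
      = pvC segs ++ (if segs.length % 2 == 1 then [pvComment l] else [])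
  | [], _, h => absurd rfl h
  | [s], l, _ => by simp [pvAppendLast, pvC, pvEvens]
  | [s, r], l, _ => by simp [pvAppendLast, pvC, pvEvens]
  | s :: r :: r2 :: rs, l, _ => by
    have ih := pvC_appendLast (r2 :: rs) l (by simp)
    show pvC (s :: r :: pvAppendLast (r2 :: rs) l) = _
    rw [pvC_cons_cons, ih, pvC_cons_cons]
    have hlen : ((s :: r :: r2 :: rs).length % 2 == 1) = ((r2 :: rs).length % 2 == 1) := by
      simp only [List.length_cons]
      congr 1
      omega
    rw [hlen, List.append_assoc]

-- main invariant: A's running state is determined by B's segment list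
set_option maxHeartbeats 1000000 in
theorem pv_main (lines : List String) (segs : List (List String)) (h : segs ≠ []) :
    lines.foldl pvAStep (pvC segs, decide (segs.length % 2 = 0))
      = (pvC (lines.foldl pvBStep segs),
         decide ((lines.foldl pvBStep segs).length % 2 = 0)) := by
  induction lines generalizing segs with
  | nil => simp
  | cons line rest ih =>
    simp only [List.foldl_cons]
    have hne' : pvBStep segs line ≠ [] := by
      unfold pvBStep
      split
      · simp
      · exact pvAppendLast_ne_nil segs line h
    have hA : pvAStep (pvC segs, decide (segs.length % 2 = 0)) line
        = (pvC (pvBStep segs line), decide ((pvBStep segs line).length % 2 = 0)) := by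
      by_cases hf : PySem.Str.startswith (PySem.Str.strip line) "```" = true
      · have hstep : pvBStep segs line = segs ++ [[]] := by
          unfold pvBStep; rw [if_pos hf]
        have hAs : pvAStep (pvC segs, decide (segs.length % 2 = 0)) line
            = (pvC segs, !decide (segs.length % 2 = 0)) := by
          unfold pvAStep; rw [if_pos hf]
        rw [hAs, hstep]
        refine Prod.ext ?_ ?_
        · exact (pvC_append_nil segs).symm
        · show (!decide (segs.length % 2 = 0)) = decide ((segs ++ [[]]).length % 2 = 0)
          simp only [List.length_append, List.length_cons, List.length_nil]
          rcases Nat.even_or_odd segs.length with he | ho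
          · have h1 : segs.length % 2 = 0 := Nat.even_iff.mp he
            have h2 : (segs.length + 1) % 2 = 1 := by omega
            simp [h1, h2]
          · have h1 : segs.length % 2 = 1 := Nat.odd_iff.mp ho
            have h2 : (segs.length + 1) % 2 = 0 := by omega
            simp [h1, h2]
      · have hf' : PySem.Str.startswith (PySem.Str.strip line) "```" = false :=
          Bool.not_eq_true _ ▸ (eq_false_of_ne_true hf)
        have hstep : pvBStep segs line = pvAppendLast segs line := by
          unfold pvBStep; rw [if_neg hf]
        have hlen := pvAppendLast_length segs line
        have hCL := pvC_appendLast segs line h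
        by_cases hic : segs.length % 2 = 0
        · -- in_code: A skips the line; B appends it to a code (odd-indexed) segment
          have hAs : pvAStep (pvC segs, decide (segs.length % 2 = 0)) line
              = (pvC segs, decide (segs.length % 2 = 0)) := by
            unfold pvAStep
            rw [if_neg hf]
            simp [hic]
          rw [hAs, hstep]
          have hz : (segs.length % 2 == 1) = false := by simp [hic]
          rw [hz] at hCL
          simp at hCL
          simp only [hCL, hlen]
        · -- not in_code: A appends the comment; B appends to a non-code segment
          have hic1 : segs.length % 2 = 1 := by omega
          have hAs : pvAStep (pvC segs, decide (segs.length % 2 = 0)) line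
              = (pvC segs ++ [pvComment line], decide (segs.length % 2 = 0)) := by
            unfold pvAStep
            rw [if_neg hf]
            simp [hic1, pvComment]
          rw [hAs, hstep]
          have hz : (segs.length % 2 == 1) = true := by simp [hic1]
          rw [hz] at hCL
          simp at hCL
          simp only [hCL, hlen]
    rw [hA]
    exact ih (pvBStep segs line) hne'

-- ===== VERDICT (by name: the statement is the Claim_ definition above) =====
theorem md_non_mermaid_as_comments_spec : Claim_equal_md_non_mermaid_as_comments := by
  intro md _
  show _ = md_non_mermaid_as_comments_alt md
  unfold md_non_mermaid_as_comments md_non_mermaid_as_comments_alt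
  have h := pv_main (PySem.Str.splitlines md) [[]] (by simp)
  have e1 : pvC ([[]] : List (List String)) = [] := rfl
  have e2 : decide ((([[]] : List (List String))).length % 2 = 0) = false := rfl
  rw [e1, e2] at h
  rw [h]
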